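-- pv_equiv track=rewrite | github.com/jdido08/TheShapesOfStories | src/archive/archive_story_metadata_older_version_9_30_2025.py | _augment_places_with_country
-- ===== SOURCE A (Python) =====
-- def _casefold_set(xs):
--     seen, out = set(), []
--     for x in xs or []:
--         k = (x or "").strip()
--         if not k: continue
--         cf = k.casefold()
--         if cf not in seen:
--             seen.add(cf); out.append(k)
--     return out
--
-- def _augment_places_with_country(places, country):
--     if not country:
--         return _casefold_set(places or [])
--     out = []
--     for p in places or []:
--         pl = (p or "").strip()
--         if not pl: continue
--         if country.lower() in pl.lower():
--             out.append(pl)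
--         else:
--             out.append(f"{pl}, {country}")
--     return _casefold_set(out)
-- ===== SOURCE B (Python) =====
-- def _augment_places_with_country(places, country):
--     seen, out = set(), []
--     for p in places or []:
--         key = (p or "").strip()
--         if not key:
--             continue
--         if country and country.lower() not in key.lower():
--             key = f"{key}, {country}".strip()
--         cf = key.casefold()
--         if cf not in seen:
--             seen.add(cf)
--             out.append(key)
--     return out
-- ===== Notes on version B (the rewrite author's own statement) =====
-- stated objective: simpler
-- what changed: A makes an augmentation pass building an intermediate list and then a second casefold-dedup pass through a helper; B is a single fused loop with no helper that augments each place and dedups it inline against a seen set.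
import Mathlib
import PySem

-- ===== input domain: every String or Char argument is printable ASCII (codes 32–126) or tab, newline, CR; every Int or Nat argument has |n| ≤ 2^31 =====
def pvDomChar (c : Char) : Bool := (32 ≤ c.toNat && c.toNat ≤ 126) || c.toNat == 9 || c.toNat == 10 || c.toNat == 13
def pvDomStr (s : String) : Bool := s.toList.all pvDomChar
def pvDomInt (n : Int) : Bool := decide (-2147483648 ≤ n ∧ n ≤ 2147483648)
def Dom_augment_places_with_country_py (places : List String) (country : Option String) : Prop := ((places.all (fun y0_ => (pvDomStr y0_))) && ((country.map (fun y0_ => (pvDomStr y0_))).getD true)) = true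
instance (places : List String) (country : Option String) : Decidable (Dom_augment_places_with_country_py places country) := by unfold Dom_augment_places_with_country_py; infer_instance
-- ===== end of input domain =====

-- B fuses A's two passes (augment, then _casefold_set dedup) into one loop with an inline seen-set and no helper; objective: simpler.
-- .casefold() is ported as PySem.Str.lower, exact on the ASCII input domain Dom.

-- ===== PORT A =====
-- body of the `for x in xs` loop of _casefold_set
def pvCsStep (st : PySem.Set String × List String) (x : String) : PySem.Set String × List String :=
  let k := PySem.Str.strip x
  if k = "" then st
  else
    let cf := PySem.Str.lower k   -- k.casefold(): = lower on the ASCII Dom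
    if PySem.Set.contains st.1 cf then st
    else (PySem.Set.add st.1 cf, st.2 ++ [k])

-- _casefold_set
def pvCasefoldSet (xs : List String) : List String :=
  (xs.foldl pvCsStep (PySem.Set.empty, [])).2

-- body of the `for p in places` loop of _augment_places_with_country (country truthy, value c)
def pvAugStep (c : String) (acc : List String) (p : String) : List String :=
  let pl := PySem.Str.strip p
  if pl = "" then acc
  else if PySem.Str.isIn (PySem.Str.lower c) (PySem.Str.lower pl) then acc ++ [pl]
  else acc ++ [pl ++ ", " ++ c]

def augment_places_with_country_py (places : List String) (country : Option String) : List String :=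
  match country with
  | none => pvCasefoldSet places          -- `if not country`
  | some c =>
    if c = "" then pvCasefoldSet places   -- `if not country` (empty string is falsy)
    else pvCasefoldSet (places.foldl (pvAugStep c) [])

-- ===== PORT B =====
-- body of B's single fused loop
def pvAltStep (country : Option String) (st : PySem.Set String × List String) (p : String) : PySem.Set String × List String :=
  let key := PySem.Str.strip p
  if key = "" then st
  else
    let key' :=
      if (match country with
          | none => false
          | some c => decide (c ≠ "") && !(PySem.Str.isIn (PySem.Str.lower c) (PySem.Str.lower key)))
      then PySem.Str.strip (key ++ ", " ++ country.getD "")   -- f"{key}, {country}".strip()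
      else key
    let cf := PySem.Str.lower key'   -- key.casefold(): = lower on the ASCII Dom
    if PySem.Set.contains st.1 cf then st
    else (PySem.Set.add st.1 cf, st.2 ++ [key'])

def augment_places_with_country_py_alt (places : List String) (country : Option String) : List String :=
  (places.foldl (pvAltStep country) (PySem.Set.empty, [])).2

-- ===== PRECONDITION & SPEC =====
def Spec_augment_places_with_country_py (places : List String) (country : Option String) (out : List String) : Prop := out = augment_places_with_country_py_alt places country
instance (places : List String) (country : Option String) (out : List String) : Decidable (Spec_augment_places_with_country_py places country out) := by unfold Spec_augment_places_with_country_py; infer_instance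

-- ===== CLAIM (what is proved, stated in full; the proofs are below) =====
def Claim_equal_augment_places_with_country_py : Prop := ∀ (places : List String) (country : Option String), Dom_augment_places_with_country_py places country → Spec_augment_places_with_country_py places country (augment_places_with_country_py places country)

-- ===== LEMMAS AND PROOFS =====

theorem mem_dropWhile_of_not {p : Char → Bool} {l : List Char} {ch : Char}
    (h : ch ∈ l) (hs : p ch = false) : ch ∈ List.dropWhile p l := by
  have heq := List.takeWhile_append_dropWhile (p := p) (l := l)
  rw [← heq] at h
  rcases List.mem_append.mp h with h' | h'
  · exact absurd (List.mem_takeWhile_imp h') (by simp [hs])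
  · exact h'

theorem dropWhile_head_false {p : Char → Bool} {l t : List Char} {x : Char}
    (h : List.dropWhile p l = x :: t) : p x = false := by
  induction l with
  | nil => simp at h
  | cons y l ih =>
    by_cases hp : p y = true
    · rw [List.dropWhile_cons, if_pos hp] at h; exact ih h
    · rw [List.dropWhile_cons, if_neg hp] at h
      injection h with h1 _; subst h1; simpa using hp

theorem chars_strip_ne_nil {cs : List Char} {ch : Char}
    (h : ch ∈ cs) (hs : PySem.Chars.isspace ch = false) :
    PySem.Chars.strip cs ≠ [] := by
  unfold PySem.Chars.strip PySem.Chars.lstrip PySem.Chars.rstrip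
  intro hnil
  have h1 : ch ∈ List.dropWhile PySem.Chars.isspace cs := mem_dropWhile_of_not h hs
  have h2 : ch ∈ (List.dropWhile PySem.Chars.isspace cs).reverse := List.mem_reverse.mpr h1
  have h3 := mem_dropWhile_of_not h2 hs
  rw [List.reverse_eq_nil_iff.mp hnil] at h3
  simp at h3

theorem chars_strip_idem (cs : List Char) :
    PySem.Chars.strip (PySem.Chars.strip cs) = PySem.Chars.strip cs := by
  unfold PySem.Chars.strip PySem.Chars.lstrip PySem.Chars.rstrip
  set sp := PySem.Chars.isspace
  set a := List.dropWhile sp cs with ha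
  set b := (List.dropWhile sp a.reverse).reverse with hb
  have hlb : List.dropWhile sp b = b := by
    cases hbc : b with
    | nil => simp
    | cons x t =>
      have hsuf : List.dropWhile sp a.reverse <:+ a.reverse := List.dropWhile_suffix sp
      have hpre : b <+: a := by
        have := (List.reverse_prefix (l₁ := List.dropWhile sp a.reverse) (l₂ := a.reverse)).mpr hsuf
        simpa [← hb] using this
      rw [hbc] at hpre
      obtain ⟨r, hr⟩ := hpre
      have hd : List.dropWhile sp cs = x :: (t ++ r) := by rw [← ha, ← hr]; simp
      have hx : sp x = false := dropWhile_head_false hd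
      simp [hx]
  have hrb : (List.dropWhile sp b.reverse).reverse = b := by
    rw [hb, List.reverse_reverse, List.dropWhile_idempotent]
  rw [hlb, hrb]

theorem str_strip_strip (s : String) :
    PySem.Str.strip (PySem.Str.strip s) = PySem.Str.strip s := by
  simp [PySem.Str.strip, String.toList_ofList, chars_strip_idem]

theorem str_strip_comma_ne (pl c : String) :
    PySem.Str.strip (pl ++ ", " ++ c) ≠ "" := by
  intro h
  have h1 : (PySem.Str.strip (pl ++ ", " ++ c)).toList = [] := by rw [h]; rfl
  rw [PySem.Str.toList_strip] at h1
  have hmem : ',' ∈ (pl ++ ", " ++ c).toList := by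
    have h2 : (", " : String).toList = [',', ' '] := rfl
    simp [String.toList_append, h2]
  exact chars_strip_ne_nil hmem (by decide) h1

theorem altStep_none (st : PySem.Set String × List String) (p : String) :
    pvAltStep none st p = pvCsStep st p := rfl

theorem altStep_empty (st : PySem.Set String × List String) (p : String) :
    pvAltStep (some "") st p = pvCsStep st p := by
  simp [pvAltStep, pvCsStep]

set_option maxHeartbeats 1000000 in
theorem step_fuse (c : String) (hc : c ≠ "") (done : List String)
    (st : PySem.Set String × List String) (p : String) :
    (pvAugStep c done p).foldl pvCsStep st = pvAltStep (some c) (done.foldl pvCsStep st) p := by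
  by_cases hpl : PySem.Str.strip p = ""
  · simp [pvAugStep, pvAltStep, hpl]
  · by_cases hin : PySem.Chars.isIn (PySem.Chars.lower c.toList) (PySem.Chars.lower (PySem.Chars.strip p.toList)) = true
    · simp [pvAugStep, pvAltStep, pvCsStep, hpl, hin, hc, List.foldl_append, str_strip_strip]
    · simp [pvAugStep, pvAltStep, pvCsStep, hpl, hin, hc, List.foldl_append,
        str_strip_comma_ne (PySem.Str.strip p) c]

theorem fuse (c : String) (hc : c ≠ "") (l : List String) :
    ∀ (acc : List String) (st : PySem.Set String × List String),
      (l.foldl (pvAugStep c) acc).foldl pvCsStep st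
        = l.foldl (pvAltStep (some c)) (acc.foldl pvCsStep st) := by
  induction l with
  | nil => intro acc st; rw [List.foldl_nil, List.foldl_nil]
  | cons p l ih =>
    intro acc st
    rw [List.foldl_cons, List.foldl_cons, ih, step_fuse c hc acc st p]

-- ===== VERDICT (by name: the statement is the Claim_ definition above) =====
theorem augment_places_with_country_py_spec : Claim_equal_augment_places_with_country_py := by
  intro places country _
  unfold Spec_augment_places_with_country_py
  unfold augment_places_with_country_py augment_places_with_country_py_alt
  rcases country with _ | c
  · dsimp only
    unfold pvCasefoldSet
    rw [show pvAltStep none = pvCsStep from funext fun st => funext fun p => altStep_none st p]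
  · dsimp only
    by_cases hc : c = ""
    · subst hc
      rw [if_pos rfl]
      unfold pvCasefoldSet
      rw [show pvAltStep (some "") = pvCsStep from funext fun st => funext fun p => altStep_empty st p]
    · rw [if_neg hc]
      unfold pvCasefoldSet
      rw [fuse c hc places [] (PySem.Set.empty, []), List.foldl_nil]
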